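-- pv_equiv track=rewrite | github.com/GPCRmd/GPCRmd | modules/covid19/views.py | nglsel_from_chainsandpos
-- ===== SOURCE A (Python) =====
-- def obtain_sel_from_chain_ressegments(chainres_d):
--     res_sel_li=[]
--     for (chainn,chaind) in chainres_d.items():
--         extremes_li=[]
--         for extremes in chaind["seg_li"]:
--             if extremes[0]!= extremes[1]:
--                 pairsel="%s-%s"%(extremes[0],extremes[1])
--             else:
--                 pairsel=str(extremes[0])
--             extremes_li.append(pairsel)
--         if chainn and chainn!= " ":
--             res_sel_ch=":%s and (%s)"%(chainn," or ".join(extremes_li))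
--         else:
--             res_sel_ch=" or ".join(extremes_li)
--         res_sel_li.append(res_sel_ch)
--
--         #[":%s and (%s)"%(chainn," or ".join( ["%s-%s" %(e[0],e[1]) if e[0]!= e[1] else str(e[0]) for e in chaind["seg_li"]])) for (chainn,chaind) in chainres_d.items()]
--     #res_sel_li=["%s:%s"%(r["seqpos"],r["chain"]) if (r["chain"] and r["chain"]!=" ") else str(r["seqpos"])  for r in mydom_resli]
--     if len(res_sel_li) >1:
--         res_sel_li=["(%s)"%e for e in res_sel_li]
--     res_sel=" or ".join(res_sel_li)
--     res_sel_fin="protein and (%s)"%res_sel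
--     return res_sel_fin
--
-- def detect_consecutive_res_segments(posli):
--     seg_li=[]
--     seg_from=posli[0]
--     seg_to=posli[0]
--     pre_pos=posli[0]
--     for pos in posli:
--         if pos >pre_pos+1:
--             seg_li.append([seg_from,pre_pos])
--             seg_from=pos
--         pre_pos=pos
--     seg_li.append([seg_from,pre_pos])
--     return seg_li
--
-- def nglsel_from_chainsandpos(chainpos):
--     chain_seg_d={}
--     for chain,posli in chainpos.items():
--         posli=sorted(list(set(posli)))
--         pos_segments=detect_consecutive_res_segments(posli)
--         chain_seg_d[chain]={}
--         chain_seg_d[chain]["seg_li"]=pos_segments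
--     mysel=obtain_sel_from_chain_ressegments(chain_seg_d)
--     return mysel
-- ===== SOURCE B (Python) =====
-- def nglsel_from_chainsandpos(chainpos):
--     clauses = []
--     for chain, posli in chainpos.items():
--         s = set(posli)
--         starts = sorted(p for p in s if p - 1 not in s)
--         ends = sorted(p for p in s if p + 1 not in s)
--         segs = [str(a) if a == b else '%s-%s' % (a, b) for a, b in zip(starts, ends)]
--         clause = ' or '.join(segs)
--         if chain and chain != ' ':
--             clause = ':%s and (%s)' % (chain, clause)
--         clauses.append(clause)
--     if len(clauses) > 1:
--         clauses = ['(%s)' % c for c in clauses]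
--     return 'protein and (%s)' % ' or '.join(clauses)
-- ===== Notes on version B (the rewrite author's own statement) =====
-- stated objective: alternative
-- what changed: B finds segment boundaries by set membership (p starts a segment iff p-1 is not in the set, ends one iff p+1 is not) and zips the sorted starts with the sorted ends, instead of A's three helpers with a sequential prev-pointer scan over the sorted list and a dict-of-dicts of segment pairs.
import Mathlib
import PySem

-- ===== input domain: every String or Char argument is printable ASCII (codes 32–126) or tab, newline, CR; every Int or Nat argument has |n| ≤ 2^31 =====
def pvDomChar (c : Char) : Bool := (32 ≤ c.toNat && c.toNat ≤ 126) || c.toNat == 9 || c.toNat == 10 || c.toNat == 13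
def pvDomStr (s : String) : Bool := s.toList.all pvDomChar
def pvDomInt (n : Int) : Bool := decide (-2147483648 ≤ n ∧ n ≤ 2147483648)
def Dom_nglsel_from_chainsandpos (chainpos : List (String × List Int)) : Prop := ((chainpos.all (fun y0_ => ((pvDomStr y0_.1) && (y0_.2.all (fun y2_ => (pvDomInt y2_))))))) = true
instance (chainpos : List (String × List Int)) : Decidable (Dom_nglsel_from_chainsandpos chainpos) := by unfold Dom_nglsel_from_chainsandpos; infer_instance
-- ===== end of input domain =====

-- B finds segment boundaries by set membership (p starts a segment iff p-1 not in the set,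
-- ends one iff p+1 not in the set) and zips the sorted starts with the sorted ends, replacing
-- A's three helpers with a sequential prev-pointer scan and a dict of dicts; objective: alternative, same cost.


-- ===== PORT A =====
-- detect_consecutive_res_segments; the 2-element Python list [seg_from, pre_pos] is ported as a pair.
-- posli[0] raises IndexError on []; Pre_ excludes that, so the getD default is never the result.
def pvDetectSegs (posli : List Int) : List (Int × Int) :=
  let seg_from := posli.getD 0 0
  let st := posli.foldl (fun (s : List (Int × Int) × Int × Int) pos =>
      if pos > s.2.2 + 1 then (s.1 ++ [(s.2.1, s.2.2)], pos, pos)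
      else (s.1, s.2.1, pos)) ([], seg_from, seg_from)
  st.1 ++ [(st.2.1, st.2.2)]

-- obtain_sel_from_chain_ressegments; the inner one-key dict {"seg_li": segs} is ported as segs.
def pvObtainSel (chainres_d : PySem.Dict String (List (Int × Int))) : String :=
  let res_sel_li := chainres_d.items.foldl (fun (acc : List String) p =>
    let extremes_li := p.2.foldl (fun (el : List String) e =>
      el ++ [if e.1 ≠ e.2 then PySem.Int.toStr e.1 ++ "-" ++ PySem.Int.toStr e.2 else PySem.Int.toStr e.1]) []
    let res_sel_ch := if p.1 ≠ "" ∧ p.1 ≠ " " then ":" ++ p.1 ++ " and (" ++ PySem.Str.join " or " extremes_li ++ ")"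
      else PySem.Str.join " or " extremes_li
    acc ++ [res_sel_ch]) []
  let res_sel_li := if res_sel_li.length > 1 then res_sel_li.map (fun e => "(" ++ e ++ ")") else res_sel_li
  "protein and (" ++ PySem.Str.join " or " res_sel_li ++ ")"

def nglsel_from_chainsandpos (chainpos : List (String × List Int)) : String :=
  let chain_seg_d := (PySem.Dict.ofList chainpos).items.foldl
    (fun (d : PySem.Dict String (List (Int × Int))) p =>
      let posli := PySem.List.sorted (PySem.Set.ofList p.2) (fun x => x) false
      d.insert p.1 (pvDetectSegs posli)) PySem.Dict.empty
  pvObtainSel chain_seg_d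

-- ===== PORT B =====
def nglsel_from_chainsandpos_alt (chainpos : List (String × List Int)) : String :=
  let clauses := (PySem.Dict.ofList chainpos).items.foldl (fun (acc : List String) p =>
    let s := PySem.Set.ofList p.2
    let starts := PySem.List.sorted (s.filter (fun q => !(PySem.Set.contains s (q - 1)))) (fun x => x) false
    let ends := PySem.List.sorted (s.filter (fun q => !(PySem.Set.contains s (q + 1)))) (fun x => x) false
    let segs := (starts.zip ends).map (fun e =>
      if e.1 = e.2 then PySem.Int.toStr e.1 else PySem.Int.toStr e.1 ++ "-" ++ PySem.Int.toStr e.2)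
    let clause := PySem.Str.join " or " segs
    let clause := if p.1 ≠ "" ∧ p.1 ≠ " " then ":" ++ p.1 ++ " and (" ++ clause ++ ")" else clause
    acc ++ [clause]) []
  let clauses := if clauses.length > 1 then clauses.map (fun c => "(" ++ c ++ ")") else clauses
  "protein and (" ++ PySem.Str.join " or " clauses ++ ")"

-- ===== PRECONDITION & SPEC =====
-- Pre_ excludes inputs where some chain's position list (the one the dict keeps for that chain) is
-- empty: there A raises IndexError at posli[0].
def Pre_nglsel_from_chainsandpos (chainpos : List (String × List Int)) : Prop :=
  ∀ v ∈ (PySem.Dict.ofList chainpos).values, v ≠ []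
instance (chainpos : List (String × List Int)) : Decidable (Pre_nglsel_from_chainsandpos chainpos) := by unfold Pre_nglsel_from_chainsandpos; infer_instance

def pvWitness_nglsel_from_chainsandpos : (List (String × List Int)) := [("A", [1, 2, 5]), ("", [3])]

def Spec_nglsel_from_chainsandpos (chainpos : List (String × List Int)) (out : String) : Prop := out = nglsel_from_chainsandpos_alt chainpos
instance (chainpos : List (String × List Int)) (out : String) : Decidable (Spec_nglsel_from_chainsandpos chainpos out) := by unfold Spec_nglsel_from_chainsandpos; infer_instance

-- ===== CLAIM (what is proved, stated in full; the proofs are below) =====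
def Claim_equal_nglsel_from_chainsandpos : Prop := ∀ (chainpos : List (String × List Int)), Dom_nglsel_from_chainsandpos chainpos → Pre_nglsel_from_chainsandpos chainpos → Spec_nglsel_from_chainsandpos chainpos (nglsel_from_chainsandpos chainpos)

-- ===== LEMMAS AND PROOFS =====

-- reference segmentation: greedily extend the open run, then recurse on the remainder
def pvExt (b : Int) : List Int → Int × List Int
  | [] => (b, [])
  | x :: xs => if x = b + 1 then pvExt x xs else (b, x :: xs)

theorem pvExt_len (b : Int) (l : List Int) : (pvExt b l).2.length ≤ l.length := by
  induction l generalizing b with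
  | nil => simp [pvExt]
  | cons x xs ih =>
    simp only [pvExt]
    split
    · exact le_trans (ih x) (Nat.le_succ _)
    · exact le_refl _

theorem pvExt_suffix (b : Int) (l : List Int) : (pvExt b l).2 <:+ l := by
  induction l generalizing b with
  | nil => simp [pvExt]
  | cons x xs ih =>
    simp only [pvExt]
    split
    · exact (ih x).trans (List.suffix_cons x xs)
    · exact List.suffix_refl _

def pvGreedy : List Int → List (Int × Int)
  | [] => []
  | a :: rest =>
    let p := pvExt a rest
    (a, p.1) :: pvGreedy p.2
termination_by l => l.length
decreasing_by simpa using Nat.lt_succ_of_le (pvExt_len a rest)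

theorem pvScan (rest : List Int) : ∀ (p f : Int) (acc : List (Int × Int)),
    List.Pairwise (· < ·) (p :: rest) →
    (let st := rest.foldl (fun (s : List (Int × Int) × Int × Int) pos =>
        if pos > s.2.2 + 1 then (s.1 ++ [(s.2.1, s.2.2)], pos, pos)
        else (s.1, s.2.1, pos)) (acc, f, p);
      st.1 ++ [(st.2.1, st.2.2)]) = acc ++ (f, (pvExt p rest).1) :: pvGreedy (pvExt p rest).2 := by
  induction rest with
  | nil => intro p f acc _; simp [pvExt, pvGreedy]
  | cons x xs ih =>
    intro p f acc hch
    rcases List.pairwise_cons.mp hch with ⟨hall, hch'⟩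
    have hpx : p < x := hall x (List.mem_cons_self)
    by_cases hx : x = p + 1
    · have hngt : ¬ (x > p + 1) := by omega
      simp only [List.foldl_cons, if_neg hngt]
      have := ih x f acc hch'
      simpa [pvExt, hx] using this
    · have hgt : x > p + 1 := by omega
      simp only [List.foldl_cons, if_pos hgt]
      have := ih x x (acc ++ [(f, p)]) hch'
      simp only [pvExt, if_neg hx]
      rw [pvGreedy]
      simpa using this

theorem pvDetect_eq_greedy (pos : List Int) (h : pos.Pairwise (· < ·)) (hne : pos ≠ []) :
    pvDetectSegs pos = pvGreedy pos := by
  match pos, hne with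
  | a :: rest, _ =>
    have hstep := pvScan rest a a [] h
    simp only [pvDetectSegs, List.getD_cons_zero, List.foldl_cons]
    have hngt : ¬ (a > a + 1) := by omega
    rw [if_neg hngt]
    rw [pvGreedy]
    simpa using hstep

-- segment starts survive pvExt: filtering "p-1 not in the list" commutes with dropping the run
theorem pvStarts_ext (rest : List Int) : ∀ a : Int, (a :: rest).Pairwise (· < ·) →
    rest.filter (fun p => !((a :: rest).contains (p - 1))) =
      (pvExt a rest).2.filter (fun p => !((pvExt a rest).2.contains (p - 1))) := by
  induction rest with
  | nil => intro a _; simp [pvExt]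
  | cons x xs ih =>
    intro a h
    rcases List.pairwise_cons.mp h with ⟨hall, h'⟩
    have hax : a < x := hall x (List.mem_cons_self)
    have hxxs : ∀ p ∈ xs, x < p := (List.pairwise_cons.mp h').1
    by_cases hx : x = a + 1
    · simp only [pvExt, if_pos hx]
      have hdrop : ((a :: x :: xs).contains (x - 1)) = true := by
        have hxa : x - 1 = a := by omega
        simp [hxa]
      have hcong : ∀ p ∈ xs, (!((a :: x :: xs).contains (p - 1))) = (!((x :: xs).contains (p - 1))) := by
        intro p hp
        have := hxxs p hp
        simp only [List.contains_cons]
        have : ¬ (p - 1 = a) := by omega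
        simp [this]
      calc (x :: xs).filter (fun p => !((a :: x :: xs).contains (p - 1)))
          = xs.filter (fun p => !((a :: x :: xs).contains (p - 1))) := by
            simp [List.filter_cons]
            intro hne
            exact absurd (by omega : x - 1 = a) hne
        _ = xs.filter (fun p => !((x :: xs).contains (p - 1))) := List.filter_congr hcong
        _ = _ := ih x h'
    · simp only [pvExt, if_neg hx]
      apply List.filter_congr
      intro p hp
      have hpge : x ≤ p := by
        rcases List.mem_cons.mp hp with h1 | h1
        · omega
        · exact le_of_lt (hxxs p h1)
      have : ¬ (p - 1 = a) := by omega
      simp only [List.contains_cons]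
      simp [this]

-- the run end is the unique element of the run whose successor is absent
theorem pvEnds_ext (rest : List Int) : ∀ a : Int, (a :: rest).Pairwise (· < ·) →
    (a :: rest).filter (fun p => !((a :: rest).contains (p + 1))) =
      (pvExt a rest).1 :: (pvExt a rest).2.filter (fun p => !((pvExt a rest).2.contains (p + 1))) := by
  induction rest with
  | nil => intro a _; simp [pvExt]
  | cons x xs ih =>
    intro a h
    rcases List.pairwise_cons.mp h with ⟨hall, h'⟩
    have hax : a < x := hall x (List.mem_cons_self)
    have hxxs : ∀ p ∈ xs, x < p := (List.pairwise_cons.mp h').1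
    by_cases hx : x = a + 1
    · simp only [pvExt, if_pos hx]
      have hdrop : ((a :: x :: xs).contains (a + 1)) = true := by
        have hxa : a + 1 = x := by omega
        simp [hxa]
      have hcong : ∀ p ∈ x :: xs, (!((a :: x :: xs).contains (p + 1))) = (!((x :: xs).contains (p + 1))) := by
        intro p hp
        have hpge : x ≤ p := by
          rcases List.mem_cons.mp hp with h1 | h1
          · omega
          · exact le_of_lt (hxxs p h1)
        have : ¬ (p + 1 = a) := by omega
        simp only [List.contains_cons]
        simp [this]
      calc (a :: x :: xs).filter (fun p => !((a :: x :: xs).contains (p + 1)))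
          = (x :: xs).filter (fun p => !((a :: x :: xs).contains (p + 1))) := by
            simp [List.filter_cons]
            intro hne
            exact absurd (by omega : a + 1 = x) hne
        _ = (x :: xs).filter (fun p => !((x :: xs).contains (p + 1))) := List.filter_congr hcong
        _ = _ := ih x h'
    · simp only [pvExt, if_neg hx]
      have hkeep : ((a :: x :: xs).contains (a + 1)) = false := by
        simp only [List.contains_eq_mem, decide_eq_false_iff_not]
        intro hmem
        rcases List.mem_cons.mp hmem with h1 | h1
        · omega
        · rcases List.mem_cons.mp h1 with h2 | h2
          · omega
          · have := hxxs _ h2; omega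
      have hcong : ∀ p ∈ x :: xs, (!((a :: x :: xs).contains (p + 1))) = (!((x :: xs).contains (p + 1))) := by
        intro p hp
        have hpge : x ≤ p := by
          rcases List.mem_cons.mp hp with h1 | h1
          · omega
          · exact le_of_lt (hxxs p h1)
        have : ¬ (p + 1 = a) := by omega
        simp only [List.contains_cons]
        simp [this]
      calc (a :: x :: xs).filter (fun p => !((a :: x :: xs).contains (p + 1)))
          = a :: (x :: xs).filter (fun p => !((a :: x :: xs).contains (p + 1))) := by
            have h2 := hkeep
            simp only [List.contains_eq_mem, decide_eq_false_iff_not] at h2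
            simp only [List.mem_cons, not_or] at h2
            simp [List.filter_cons]
            exact ⟨h2.2.1, h2.2.2⟩
        _ = a :: (x :: xs).filter (fun p => !((x :: xs).contains (p + 1))) := by
            rw [List.filter_congr hcong]

theorem pvGreedy_fst (pos : List Int) (h : pos.Pairwise (· < ·)) :
    (pvGreedy pos).map Prod.fst = pos.filter (fun p => !(pos.contains (p - 1))) := by
  match pos with
  | [] => simp [pvGreedy]
  | a :: rest =>
    rcases List.pairwise_cons.mp h with ⟨hall, h'⟩
    have htail : (pvExt a rest).2.Pairwise (· < ·) :=
      List.Pairwise.sublist ((pvExt_suffix a rest).sublist) h'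
    have hkeep : ((a :: rest).contains (a - 1)) = false := by
      simp only [List.contains_eq_mem, decide_eq_false_iff_not]
      intro hmem
      rcases List.mem_cons.mp hmem with h1 | h1
      · omega
      · have := hall _ h1; omega
    rw [pvGreedy]
    have := pvGreedy_fst (pvExt a rest).2 htail
    simp only [List.map_cons, this, List.filter_cons, hkeep]
    simp only [Bool.not_false, if_pos]
    rw [pvStarts_ext rest a h]
termination_by pos.length
decreasing_by simpa using Nat.lt_succ_of_le (pvExt_len a rest)

theorem pvGreedy_snd (pos : List Int) (h : pos.Pairwise (· < ·)) :
    (pvGreedy pos).map Prod.snd = pos.filter (fun p => !(pos.contains (p + 1))) := by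
  match pos with
  | [] => simp [pvGreedy]
  | a :: rest =>
    have htail : (pvExt a rest).2.Pairwise (· < ·) :=
      List.Pairwise.sublist ((pvExt_suffix a rest).sublist) (List.pairwise_cons.mp h).2
    rw [pvGreedy]
    have := pvGreedy_snd (pvExt a rest).2 htail
    simp only [List.map_cons, this]
    rw [pvEnds_ext rest a h]
termination_by pos.length
decreasing_by simpa using Nat.lt_succ_of_le (pvExt_len a rest)

-- per-chain clause of port B
def pvClauseB (p : String × List Int) : String :=
  let s := PySem.Set.ofList p.2
  let starts := PySem.List.sorted (s.filter (fun q => !(PySem.Set.contains s (q - 1)))) (fun x => x) false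
  let ends := PySem.List.sorted (s.filter (fun q => !(PySem.Set.contains s (q + 1)))) (fun x => x) false
  let segs := (starts.zip ends).map (fun e =>
    if e.1 = e.2 then PySem.Int.toStr e.1 else PySem.Int.toStr e.1 ++ "-" ++ PySem.Int.toStr e.2)
  let clause := PySem.Str.join " or " segs
  if p.1 ≠ "" ∧ p.1 ≠ " " then ":" ++ p.1 ++ " and (" ++ clause ++ ")" else clause

-- sorting the membership-filtered set = filtering the sorted set
theorem pvSortedFilter (v : List Int) (P : Int → Bool) :
    PySem.List.sorted ((PySem.Set.ofList v).filter P) (fun x => x) false =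
      (PySem.List.sorted (PySem.Set.ofList v) (fun x => x) false).filter P := by
  apply PySem.List.sorted_eq_of_perm_of_pairwise_lt
  · exact (PySem.List.sorted_perm _ _ _).filter P
  · exact (PySem.List.sorted_ofList_pairwise_lt v).filter P

theorem pvClause_eq (p : String × List Int) (hv : p.2 ≠ []) :
    (let extremes_li := (pvDetectSegs (PySem.List.sorted (PySem.Set.ofList p.2) (fun x => x) false)).foldl
        (fun (el : List String) e =>
          el ++ [if e.1 ≠ e.2 then PySem.Int.toStr e.1 ++ "-" ++ PySem.Int.toStr e.2 else PySem.Int.toStr e.1]) []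
      if p.1 ≠ "" ∧ p.1 ≠ " " then ":" ++ p.1 ++ " and (" ++ PySem.Str.join " or " extremes_li ++ ")"
      else PySem.Str.join " or " extremes_li) = pvClauseB p := by
  set s := PySem.Set.ofList p.2 with hs
  set pos := PySem.List.sorted s (fun x => x) false with hposdef
  have hpos : pos ≠ [] := by
    intro he
    have : s = [] := (PySem.List.sorted_eq_nil_iff _ _ _).mp he
    rw [hs] at this
    cases hv' : p.2 with
    | nil => exact hv hv'
    | cons x xs => rw [hv', PySem.Set.ofList_cons] at this; exact List.cons_ne_nil _ _ this
  have hlt : pos.Pairwise (· < ·) := PySem.List.sorted_ofList_pairwise_lt p.2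
  have hdet := pvDetect_eq_greedy pos hlt hpos
  -- B's starts/ends over the set = filters of pos
  have hmemc : ∀ y : Int, PySem.Set.contains s y = pos.contains y := by
    intro y
    simp only [PySem.Set.contains_eq_listContains, List.contains_eq_mem]
    congr 1
    simp [hposdef, PySem.List.mem_sorted]
  have hstarts : PySem.List.sorted (s.filter (fun q => !(PySem.Set.contains s (q - 1)))) (fun x => x) false
      = pos.filter (fun q => !(pos.contains (q - 1))) := by
    rw [hs, pvSortedFilter]
    exact List.filter_congr (fun q _ => by rw [hmemc])
  have hends : PySem.List.sorted (s.filter (fun q => !(PySem.Set.contains s (q + 1)))) (fun x => x) false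
      = pos.filter (fun q => !(pos.contains (q + 1))) := by
    rw [hs, pvSortedFilter]
    exact List.filter_congr (fun q _ => by rw [hmemc])
  have hzip : (pos.filter (fun q => !(pos.contains (q - 1)))).zip
      (pos.filter (fun q => !(pos.contains (q + 1)))) = pvGreedy pos := by
    rw [← pvGreedy_fst pos hlt, ← pvGreedy_snd pos hlt, List.zip_map']
    simp
  simp only [pvClauseB]
  rw [hstarts, hends, hzip, hdet, PySem.List.foldl_append_singleton_eq_map]
  have hfmt : (pvGreedy pos).map (fun e : Int × Int =>
        if e.1 ≠ e.2 then PySem.Int.toStr e.1 ++ "-" ++ PySem.Int.toStr e.2 else PySem.Int.toStr e.1)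
      = (pvGreedy pos).map (fun e : Int × Int =>
        if e.1 = e.2 then PySem.Int.toStr e.1 else PySem.Int.toStr e.1 ++ "-" ++ PySem.Int.toStr e.2) := by
    apply List.map_congr_left
    intro e _
    by_cases he : e.1 = e.2 <;> simp [he]
  rw [show ([] : List String) ++ _ = _ from List.nil_append _, hfmt]

-- ===== VERDICT (by name: the statement is the Claim_ definition above) =====
theorem nglsel_from_chainsandpos_spec : Claim_equal_nglsel_from_chainsandpos := by
  intro chainpos _hdom hpre
  show nglsel_from_chainsandpos chainpos = nglsel_from_chainsandpos_alt chainpos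
  unfold nglsel_from_chainsandpos nglsel_from_chainsandpos_alt pvObtainSel
  have hnd : ((PySem.Dict.ofList chainpos).items.map (·.1)).Nodup :=
    PySem.Dict.nodup_keys_ofList chainpos
  have hfresh := PySem.Dict.items_foldl_insert_fresh
    (l := (PySem.Dict.ofList chainpos).items)
    (k := (·.1))
    (v := fun p => pvDetectSegs (PySem.List.sorted (PySem.Set.ofList p.2) (fun x => x) false))
    (d := PySem.Dict.empty)
    (by intro a _; exact PySem.Dict.contains_empty _) hnd
  have hempty : (PySem.Dict.empty : PySem.Dict String (List (Int × Int))).items = [] := rfl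
  rw [hempty, List.nil_append] at hfresh
  simp only [hfresh]
  rw [PySem.List.foldl_append_singleton_eq_map, PySem.List.foldl_append_singleton_eq_map]
  simp only [List.nil_append]
  have hmap : ∀ p ∈ (PySem.Dict.ofList chainpos).items,
      ((fun p : String × List (Int × Int) =>
        if p.1 ≠ "" ∧ p.1 ≠ " " then
          ":" ++ p.1 ++ " and (" ++ PySem.Str.join " or "
            (p.2.foldl (fun (el : List String) e =>
              el ++ [if e.1 ≠ e.2 then PySem.Int.toStr e.1 ++ "-" ++ PySem.Int.toStr e.2 else PySem.Int.toStr e.1]) []) ++ ")"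
        else PySem.Str.join " or "
            (p.2.foldl (fun (el : List String) e =>
              el ++ [if e.1 ≠ e.2 then PySem.Int.toStr e.1 ++ "-" ++ PySem.Int.toStr e.2 else PySem.Int.toStr e.1]) [])) ∘
        (fun p : String × List Int => (p.1, pvDetectSegs (PySem.List.sorted (PySem.Set.ofList p.2) (fun x => x) false)))) p
      = pvClauseB p := by
    intro p hp
    have hv : p.2 ∈ (PySem.Dict.ofList chainpos).values := by
      simp only [PySem.Dict.values]
      exact List.mem_map.mpr ⟨p, hp, rfl⟩
    exact pvClause_eq p (hpre p.2 hv)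
  have hL : List.map (fun p : String × List (Int × Int) =>
        if p.1 ≠ "" ∧ p.1 ≠ " " then
          ":" ++ p.1 ++ " and (" ++ PySem.Str.join " or "
            (p.2.foldl (fun (el : List String) e =>
              el ++ [if e.1 ≠ e.2 then PySem.Int.toStr e.1 ++ "-" ++ PySem.Int.toStr e.2 else PySem.Int.toStr e.1]) []) ++ ")"
        else PySem.Str.join " or "
            (p.2.foldl (fun (el : List String) e =>
              el ++ [if e.1 ≠ e.2 then PySem.Int.toStr e.1 ++ "-" ++ PySem.Int.toStr e.2 else PySem.Int.toStr e.1]) []))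
      (List.map (fun p : String × List Int =>
        (p.1, pvDetectSegs (PySem.List.sorted (PySem.Set.ofList p.2) (fun x => x) false)))
        (PySem.Dict.ofList chainpos).items)
      = List.map pvClauseB (PySem.Dict.ofList chainpos).items := by
    rw [List.map_map]
    exact List.map_congr_left hmap
  rw [hL]
  rfl
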